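-- pv_equiv track=rewrite | github.com/sri-nadh/Cfn-Sanitizer | cfn_sanitizer/utils.py | format_yaml_output
-- ===== SOURCE A (Python) =====
-- def format_yaml_output(yaml_str):
--     """
--     Format CloudFormation YAML with proper spacing and structure.
--
--     This function carefully formats CloudFormation templates for best readability:
--     1. Adds blank lines between top-level sections
--     2. Adds blank lines between individual parameters and resources
--     3. Keeps each parameter/resource block internally compact
--     """
--     # Clean up any existing blank lines
--     lines = [line for line in yaml_str.split('\n') if line.strip() or line == '']
--
--     # Define the top-level sections
--     top_level_sections = [
--         'AWSTemplateFormatVersion:',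
--         'Description:',
--         'Parameters:',
--         'Mappings:',
--         'Conditions:',
--         'Transform:',
--         'Resources:',
--         'Outputs:',
--         'Metadata:'
--     ]
--
--     # Completely rebuild the output line by line with proper formatting
--     output_lines = []
--     current_section = None
--     parameter_count = 0
--     inside_block = False
--
--     i = 0
--     while i < len(lines):
--         line = lines[i]
--
--         # Handle top-level sections
--         if any(line.strip().startswith(section) for section in top_level_sections):
--             # Add blank line before top-level sections (except first)
--             if output_lines and output_lines[-1] != '':
--                 output_lines.append('')
--
--             output_lines.append(line)
--             current_section = line.strip().split(':')[0]
--             parameter_count = 0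
--             inside_block = False
--             i += 1
--             continue
--
--         # Handle level 2 items (parameters, resources)
--         if line.strip() and len(line) - len(line.lstrip()) == 2 and ':' in line:
--             if parameter_count > 0 and current_section in ['Parameters', 'Resources', 'Mappings', 'Outputs']:
--                 # Add blank line between parameters/resources
--                 if output_lines[-1] != '':
--                     output_lines.append('')
--
--             parameter_count += 1
--             inside_block = True
--             output_lines.append(line)
--
--             # Process the parameter block properties
--             j = i + 1
--             while j < len(lines) and (not lines[j].strip() or len(lines[j]) - len(lines[j].lstrip()) > 2):
--                 if lines[j].strip():  # Only add non-empty lines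
--                     output_lines.append(lines[j])
--                 j += 1
--
--             i = j
--             continue
--
--         # Add any other lines
--         if line.strip():
--             output_lines.append(line)
--
--         i += 1
--
--     # Join lines and ensure there's a trailing newline
--     result = '\n'.join(output_lines)
--     if not result.endswith('\n'):
--         result += '\n'
--
--     return result
-- ===== SOURCE B (Python) =====
-- def format_yaml_output(yaml_str):
--     """Flat single-pass state machine: an in_block flag replaces A's nested inner while loop."""
--     lines = [line for line in yaml_str.split('\n') if line.strip() or line == '']
--
--     top_level_sections = [
--         'AWSTemplateFormatVersion:',
--         'Description:',
--         'Parameters:',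
--         'Mappings:',
--         'Conditions:',
--         'Transform:',
--         'Resources:',
--         'Outputs:',
--         'Metadata:'
--     ]
--
--     out = []
--     current_section = None
--     parameter_count = 0
--     in_block = False
--
--     for line in lines:
--         if in_block:
--             if not line.strip():
--                 continue  # blank inside a block: dropped, block continues
--             if len(line) - len(line.lstrip()) > 2:
--                 out.append(line)  # block body line
--                 continue
--             in_block = False  # first non-blank line at indent <= 2 ends the block
--
--         stripped = line.strip()
--         if any(stripped.startswith(s) for s in top_level_sections):
--             if out and out[-1] != '':
--                 out.append('')
--             out.append(line)
--             current_section = stripped.split(':')[0]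
--             parameter_count = 0
--         elif stripped and len(line) - len(line.lstrip()) == 2 and ':' in line:
--             if parameter_count > 0 and current_section in ['Parameters', 'Resources', 'Mappings', 'Outputs']:
--                 if out[-1] != '':
--                     out.append('')
--             parameter_count += 1
--             out.append(line)
--             in_block = True
--         elif stripped:
--             out.append(line)
--
--     result = '\n'.join(out)
--     if not result.endswith('\n'):
--         result += '\n'
--     return result
-- ===== Notes on version B (the rewrite author's own statement) =====
-- stated objective: simpler
-- what changed: The nested inner while loop that consumes a parameter block (with index juggling and continue) is replaced by a single flat for-loop over the lines driven by an in_block state flag.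
import Mathlib
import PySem

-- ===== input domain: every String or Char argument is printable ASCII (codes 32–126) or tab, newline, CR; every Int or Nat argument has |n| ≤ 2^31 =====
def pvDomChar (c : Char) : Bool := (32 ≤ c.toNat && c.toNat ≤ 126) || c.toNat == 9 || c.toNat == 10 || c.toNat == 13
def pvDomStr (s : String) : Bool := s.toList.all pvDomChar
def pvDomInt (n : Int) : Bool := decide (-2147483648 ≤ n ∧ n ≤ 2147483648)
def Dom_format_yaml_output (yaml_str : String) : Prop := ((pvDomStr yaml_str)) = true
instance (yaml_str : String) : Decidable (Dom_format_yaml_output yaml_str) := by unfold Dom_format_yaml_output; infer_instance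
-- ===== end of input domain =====

-- B replaces A's nested inner while loop by one flat pass with an in_block flag (objective: simpler).

-- shared helpers: both Pythons contain these identical expressions verbatim
def pvSections : List String :=
  ["AWSTemplateFormatVersion:", "Description:", "Parameters:", "Mappings:",
   "Conditions:", "Transform:", "Resources:", "Outputs:", "Metadata:"]

-- any(line.strip().startswith(section) for section in top_level_sections)
def pvIsTop (line : String) : Bool :=
  pvSections.any (fun s => PySem.Str.startswith (PySem.Str.strip line) s)

-- len(line) - len(line.lstrip())
def pvIndent (line : String) : Int :=
  PySem.Str.len line - PySem.Str.len (PySem.Str.lstrip line)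

-- not line.strip()
def pvIsBlank (line : String) : Bool := PySem.Str.strip line == ""

-- line.strip() and len(line) - len(line.lstrip()) == 2 and ':' in line
def pvIsLvl2 (line : String) : Bool :=
  !pvIsBlank line && pvIndent line == 2 && PySem.Str.isIn ":" line

-- line.strip().split(':')[0]  (split? with sep ":" is always some of a nonempty list)
def pvSectOf (line : String) : String :=
  (((PySem.Str.split? (PySem.Str.strip line) ":").getD []).headD "")

-- current_section in ['Parameters', 'Resources', 'Mappings', 'Outputs']  (None compares unequal)
def pvGated (cs : Option String) : Bool :=
  cs == some "Parameters" || cs == some "Resources" || cs == some "Mappings" || cs == some "Outputs"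

-- [line for line in yaml_str.split('\n') if line.strip() or line == '']
def pvClean (yaml_str : String) : List String :=
  ((PySem.Str.split? yaml_str "\n").getD []).filter (fun l => PySem.Str.strip l != "" || l == "")

-- result = '\n'.join(out); if not result.endswith('\n'): result += '\n'
def pvFinish (out : List String) : String :=
  let result := PySem.Str.join "\n" out
  if !PySem.Str.endswith result "\n" then PySem.Str.join "" [result, "\n"] else result

-- ===== PORT A =====
-- the inner 'while j < len(lines) and (not lines[j].strip() or indent > 2)' loop:
-- returns (output_lines after the block, remaining lines from j on)
def pvConsumeA : List String → List String → (List String × List String)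
  | [], out => (out, [])
  | l :: ls, out =>
    if pvIsBlank l || pvIndent l > 2 then
      pvConsumeA ls (if !pvIsBlank l then out ++ [l] else out)
    else (out, l :: ls)

theorem pvConsumeA_len : ∀ (ls out : List String), (pvConsumeA ls out).2.length ≤ ls.length := by
  intro ls
  induction ls with
  | nil => intro out; simp [pvConsumeA]
  | cons l ls ih =>
    intro out
    simp only [pvConsumeA]
    split
    · exact Nat.le_succ_of_le (ih _)
    · simp

-- the outer while loop of A (i advances; state: output_lines, current_section, parameter_count;
--  A's inside_block variable is written but never read, so it is omitted).
-- output_lines[-1] is read via pyGetD with default "": A only reads it when output_lines is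
-- provably nonempty (pc > 0 or output_lines truthy), so the default is never used.
def pvLoopA (lines : List String) (out : List String) (cs : Option String) (pc : Int) : List String :=
  match lines with
  | [] => out
  | line :: rest =>
    if pvIsTop line then
      let out1 := if out != [] && PySem.List.pyGetD out (-1) "" != "" then out ++ [""] else out
      pvLoopA rest (out1 ++ [line]) (some (pvSectOf line)) 0
    else if pvIsLvl2 line then
      let out1 := if decide (0 < pc) && pvGated cs then
          (if PySem.List.pyGetD out (-1) "" != "" then out ++ [""] else out) else out
      let r := pvConsumeA rest (out1 ++ [line])
      pvLoopA r.2 r.1 cs (pc + 1)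
    else if !pvIsBlank line then pvLoopA rest (out ++ [line]) cs pc
    else pvLoopA rest out cs pc
termination_by lines.length
decreasing_by
  · simp
  · exact Nat.lt_succ_of_le (pvConsumeA_len _ _)
  · simp
  · simp

def format_yaml_output (yaml_str : String) : String :=
  pvFinish (pvLoopA (pvClean yaml_str) [] none 0)

-- ===== PORT B =====
-- one step of B's flat for-loop; state = (out, current_section, parameter_count, in_block)
def pvStepB (st : List String × Option String × Int × Bool) (line : String) :
    List String × Option String × Int × Bool :=
  let (out, cs, pc, inB) := st
  if inB && pvIsBlank line then st
  else if inB && decide (pvIndent line > 2) then (out ++ [line], cs, pc, true)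
  else
    if pvIsTop line then
      ((if out != [] && PySem.List.pyGetD out (-1) "" != "" then out ++ [""] else out) ++ [line],
        some (pvSectOf line), 0, false)
    else if pvIsLvl2 line then
      ((if decide (0 < pc) && pvGated cs then
          (if PySem.List.pyGetD out (-1) "" != "" then out ++ [""] else out) else out) ++ [line],
        cs, pc + 1, true)
    else if !pvIsBlank line then (out ++ [line], cs, pc, false)
    else (out, cs, pc, false)

def format_yaml_output_alt (yaml_str : String) : String :=
  pvFinish ((pvClean yaml_str).foldl pvStepB ([], none, 0, false)).1

-- ===== PRECONDITION & SPEC =====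
def Spec_format_yaml_output (yaml_str : String) (out : String) : Prop := out = format_yaml_output_alt yaml_str
instance (yaml_str : String) (out : String) : Decidable (Spec_format_yaml_output yaml_str out) := by unfold Spec_format_yaml_output; infer_instance

-- ===== CLAIM (what is proved, stated in full; the proofs are below) =====
def Claim_equal_format_yaml_output : Prop := ∀ (yaml_str : String), Dom_format_yaml_output yaml_str → Spec_format_yaml_output yaml_str (format_yaml_output yaml_str)

-- ===== LEMMAS AND PROOFS =====

-- classification does not look at the in_block flag
theorem pvStepB_true_of_not_inb (line : String) (out : List String) (cs : Option String) (pc : Int)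
    (hb : pvIsBlank line = false) (hi : ¬ pvIndent line > 2) :
    pvStepB (out, cs, pc, true) line = pvStepB (out, cs, pc, false) line := by
  simp [pvStepB, hb, hi]

-- B's fold in the in_block = true phase IS A's inner consume loop
theorem pvFoldB_true (ls : List String) : ∀ (out : List String) (cs : Option String) (pc : Int),
    (List.foldl pvStepB (out, cs, pc, true) ls).1 =
      (List.foldl pvStepB ((pvConsumeA ls out).1, cs, pc, false) (pvConsumeA ls out).2).1 := by
  induction ls with
  | nil => intro out cs pc; simp [pvConsumeA]
  | cons l ls ih =>
    intro out cs pc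
    by_cases hb : pvIsBlank l = true
    · have h1 : pvStepB (out, cs, pc, true) l = (out, cs, pc, true) := by simp [pvStepB, hb]
      have h2 : pvConsumeA (l :: ls) out = pvConsumeA ls out := by simp [pvConsumeA, hb]
      rw [List.foldl_cons, h1, h2, ih]
    · rw [Bool.not_eq_true] at hb
      by_cases hi : pvIndent l > 2
      · have h1 : pvStepB (out, cs, pc, true) l = (out ++ [l], cs, pc, true) := by
          simp [pvStepB, hb, hi]
        have h2 : pvConsumeA (l :: ls) out = pvConsumeA ls (out ++ [l]) := by
          simp [pvConsumeA, hb, hi]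
        rw [List.foldl_cons, h1, h2, ih]
      · have h2 : pvConsumeA (l :: ls) out = (out, l :: ls) := by
          simp [pvConsumeA, hb, hi]
        rw [h2, List.foldl_cons, List.foldl_cons, pvStepB_true_of_not_inb l out cs pc hb hi]

-- main invariant: A's outer loop equals B's fold started with in_block = false
theorem pvMain : ∀ (n : ℕ) (ls : List String), ls.length ≤ n → ∀ (out : List String) (cs : Option String) (pc : Int),
    pvLoopA ls out cs pc = (List.foldl pvStepB (out, cs, pc, false) ls).1 := by
  intro n
  induction n with
  | zero =>
    intro ls hls out cs pc
    have : ls = [] := List.eq_nil_of_length_eq_zero (Nat.le_zero.mp hls)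
    subst this; simp [pvLoopA]
  | succ n ih =>
    intro ls hls out cs pc
    match ls with
    | [] => simp [pvLoopA]
    | line :: rest =>
      have hrest : rest.length ≤ n := by simpa using Nat.succ_le_succ_iff.mp hls
      rw [pvLoopA, List.foldl_cons]
      by_cases ht : pvIsTop line = true
      · have hs : pvStepB (out, cs, pc, false) line =
            ((if out != [] && PySem.List.pyGetD out (-1) "" != "" then out ++ [""] else out) ++ [line],
              some (pvSectOf line), 0, false) := by
          simp [pvStepB, ht]
        rw [hs]; simp only [ht, if_pos]
        exact ih rest hrest _ _ _
      · by_cases h2 : pvIsLvl2 line = true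
        · have hs : pvStepB (out, cs, pc, false) line =
              ((if decide (0 < pc) && pvGated cs then
                  (if PySem.List.pyGetD out (-1) "" != "" then out ++ [""] else out) else out) ++ [line],
                cs, pc + 1, true) := by
            simp [pvStepB, ht, h2]
          rw [hs, pvFoldB_true]
          simp only [ht, h2, Bool.false_eq_true, if_false, if_pos]
          exact ih _ (le_trans (pvConsumeA_len _ _) hrest) _ _ _
        · by_cases hb : pvIsBlank line = true
          · have hs : pvStepB (out, cs, pc, false) line = (out, cs, pc, false) := by
              simp [pvStepB, ht, h2, hb]
            rw [hs]
            simp only [ht, h2, hb, Bool.false_eq_true, if_false, Bool.not_true]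
            exact ih rest hrest _ _ _
          · have hs : pvStepB (out, cs, pc, false) line = (out ++ [line], cs, pc, false) := by
              simp [pvStepB, ht, h2, hb]
            rw [hs]
            simp only [ht, h2, hb, Bool.false_eq_true, if_false, Bool.not_false, if_pos]
            exact ih rest hrest _ _ _

-- ===== VERDICT (by name: the statement is the Claim_ definition above) =====
theorem format_yaml_output_spec : Claim_equal_format_yaml_output := by
  intro yaml_str _
  unfold Spec_format_yaml_output format_yaml_output format_yaml_output_alt
  rw [pvMain (pvClean yaml_str).length _ (le_refl _)]
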